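-- pv_equiv track=rewrite | github.com/ashbhargav/Prompt-Guard | promptguard/core/heuristics.py | _has_repetitive_chars
-- ===== SOURCE A (Python) =====
-- def _has_repetitive_chars(text: str, threshold: int = 15) -> bool:
--     """Check for long sequences of the same character."""
--     count = 0
--     last_char = ''
--     for char in text:
--         if char == last_char:
--             count += 1
--             if count >= threshold:
--                 return True
--         else:
--             count = 1
--             last_char = char
--     return False
-- ===== SOURCE B (Python) =====
-- def _has_repetitive_chars(text: str, threshold: int = 15) -> bool:
--     """Check for long sequences of the same character (sliding-window view).
--
--     The text contains a qualifying run iff some fixed-width window of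
--     need = max(threshold, 2) consecutive characters is constant; need is at
--     least 2 because the original never compares a run's first character.
--     """
--     need = max(threshold, 2)
--     return any(text[i:i + need] == text[i] * need
--                for i in range(len(text) - need + 1))
-- ===== Notes on version B (the rewrite author's own statement) =====
-- stated objective: alternative
-- what changed: Replaces the stateful count/last_char run-counting loop with a sliding fixed-width window test: the text triggers iff some window of max(threshold,2) consecutive characters is constant, checked by substring comparison against char*need.
import Mathlib
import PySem

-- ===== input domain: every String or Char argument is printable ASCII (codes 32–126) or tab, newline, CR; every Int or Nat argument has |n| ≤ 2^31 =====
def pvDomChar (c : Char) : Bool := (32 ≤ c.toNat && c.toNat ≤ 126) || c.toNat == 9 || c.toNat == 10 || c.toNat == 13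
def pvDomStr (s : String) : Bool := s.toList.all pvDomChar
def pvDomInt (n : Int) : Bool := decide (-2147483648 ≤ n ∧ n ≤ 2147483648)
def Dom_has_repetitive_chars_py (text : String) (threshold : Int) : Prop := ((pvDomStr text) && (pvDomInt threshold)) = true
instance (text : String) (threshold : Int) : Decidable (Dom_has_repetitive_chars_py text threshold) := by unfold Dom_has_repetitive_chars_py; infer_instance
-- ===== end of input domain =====

-- B replaces A's stateful count/last_char run-counting loop by a sliding fixed-width
-- window test (text[i:i+need] == text[i]*need for need = max(threshold, 2)); objective: alternative.

-- ===== PORT A =====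
-- A's loop: state (count, last_char); last_char starts as '' which never equals a
-- one-character string, ported exactly as `none : Option Char` (the first comparison
-- `some c = none` is false exactly as `char == ''` is).
def goA (thr : Int) : List Char → Int → Option Char → Bool
  | [], _, _ => false
  | c :: rest, count, last =>
    if some c = last then
      if count + 1 ≥ thr then true else goA thr rest (count + 1) last
    else
      goA thr rest 1 (some c)

def has_repetitive_chars_py (text : String) (threshold : Int) : Bool :=
  goA threshold text.toList 0 none

-- ===== PORT B =====
-- Source B: need = max(threshold, 2); any(text[i:i+need] == text[i]*need
--       for i in range(len(text) - need + 1)).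
def has_repetitive_chars_py_alt (text : String) (threshold : Int) : Bool :=
  let need := max threshold 2
  let L := text.toList
  (PySem.List.pyRange 0 ((L.length : Int) - need + 1) 1).any fun i =>
    decide (PySem.List.slice L (some i) (some (i + need)) =
      (match PySem.List.pyGet? L i with
       | some c => List.replicate need.toNat c
       | none => []))

-- ===== PRECONDITION & SPEC =====
def Spec_has_repetitive_chars_py (text : String) (threshold : Int) (out : Bool) : Prop := out = has_repetitive_chars_py_alt text threshold
instance (text : String) (threshold : Int) (out : Bool) : Decidable (Spec_has_repetitive_chars_py text threshold out) := by unfold Spec_has_repetitive_chars_py; infer_instance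

-- ===== CLAIM (what is proved, stated in full; the proofs are below) =====
def Claim_equal_has_repetitive_chars_py : Prop := ∀ (text : String) (threshold : Int), Dom_has_repetitive_chars_py text threshold → Spec_has_repetitive_chars_py text threshold (has_repetitive_chars_py text threshold)

-- ===== LEMMAS AND PROOFS =====

-- Common intermediate form: `hasRun k L` scans every suffix of L and checks whether
-- its first k characters all equal its head.
def hasRun (k : Nat) : List Char → Bool
  | [] => false
  | c :: rest => decide ((c :: rest).take k = List.replicate k c) || hasRun k rest

theorem take_ne_replicate_of_short {k : Nat} {s : List Char} {c : Char}
    (h : s.length < k) : ¬ (s.take k = List.replicate k c) := by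
  intro he
  have := congrArg List.length he
  simp [List.length_take] at this
  omega

theorem hasRun_short {k : Nat} : ∀ (L : List Char), L.length < k → hasRun k L = false := by
  intro L
  induction L with
  | nil => intro _; rfl
  | cons c rest ih =>
    intro h
    have hr : rest.length < k := by simp at h; omega
    simp only [hasRun, ih hr, Bool.or_false]
    simp [take_ne_replicate_of_short (show (c :: rest).length < k from h)]

-- Prepending a too-short run of a different character does not create a window.
theorem hasRun_prepend_short {k : Nat} {c d : Char} (hne : c ≠ d) :
    ∀ (n : Nat), n < k → ∀ (rest : List Char),
    hasRun k (List.replicate n c ++ d :: rest) = hasRun k (d :: rest) := by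
  intro n
  induction n with
  | zero => intro _ rest; rfl
  | succ m ih =>
    intro h rest
    have hstep : List.replicate (m+1) c ++ d :: rest
        = c :: (List.replicate m c ++ d :: rest) := by
      simp [List.replicate_succ]
    rw [hstep]
    have hunfold : hasRun k (c :: (List.replicate m c ++ d :: rest))
        = (decide ((c :: (List.replicate m c ++ d :: rest)).take k = List.replicate k c)
           || hasRun k (List.replicate m c ++ d :: rest)) := rfl
    rw [hunfold, ih (by omega) rest]
    have hhead : ¬ ((c :: (List.replicate m c ++ d :: rest)).take k
        = List.replicate k c) := by
      intro he
      have := congrArg (fun l => l[m+1]?) he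
      simp only [List.getElem?_take] at this
      rw [if_pos h] at this
      have hidx : (c :: (List.replicate m c ++ d :: rest))[m+1]? = some d := by
        have : (List.replicate (m+1) c ++ d :: rest)[m+1]? = some d := by
          rw [List.getElem?_append_right (by simp)]
          simp
        rw [hstep] at this; exact this
      rw [hidx, List.getElem?_replicate, if_pos h] at this
      exact hne (Option.some.injEq .. ▸ this.symm ▸ rfl)
    simp [hhead]

-- A's loop from state (count = n, last = c), 1 ≤ n < k, equals hasRun k on the
-- run seen so far plus the remaining input, where k = max(threshold, 2).
theorem goA_eq_hasRun {thr : Int} {k : Nat} (hk : (k : Int) = max thr 2) :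
    ∀ (cs : List Char) (c : Char) (n : Nat), 1 ≤ n → n < k →
    goA thr cs (n : Int) (some c) = hasRun k (List.replicate n c ++ cs) := by
  intro cs
  induction cs with
  | nil =>
    intro c n _ hn
    simp [goA, hasRun_short (List.replicate n c) (by simp; omega)]
  | cons d rest ih =>
    intro c n hn1 hnk
    by_cases hd : d = c
    · subst hd
      have hmerge : List.replicate n d ++ d :: rest
          = List.replicate (n+1) d ++ rest := by
        simp [List.replicate_succ' (n := n)]
      by_cases hth : (n : Int) + 1 ≥ thr
      · have hA : goA thr (d :: rest) (n : Int) (some d) = true := by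
          simp [goA, hth]
        have hk1 : k ≤ n + 1 := by
          have h2 : (2 : Int) ≤ (n : Int) + 1 := by exact_mod_cast Nat.succ_le_succ hn1
          have : (k : Int) ≤ (n : Int) + 1 := by rw [hk]; omega
          exact_mod_cast this
        have hhead : (List.replicate n d ++ d :: rest).take k
            = List.replicate k d := by
          rw [hmerge, List.take_append_of_le_length (by simpa using hk1)]
          simp [Nat.min_eq_left hk1]
        have hcons : List.replicate n d ++ d :: rest
            = d :: (List.replicate (n-1) d ++ d :: rest) := by
          cases n with
          | zero => omega
          | succ m => simp [List.replicate_succ]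
        rw [hA]
        rw [hcons] at hhead ⊢
        simp [hasRun, hhead]
      · have hA : goA thr (d :: rest) (n : Int) (some d)
            = goA thr rest ((n : Int) + 1) (some d) := by
          simp [goA, hth]
        have hnk1 : n + 1 < k := by
          have : (n : Int) + 1 < thr := by omega
          have : (n : Int) + 1 < (k : Int) := by rw [hk]; omega
          exact_mod_cast this
        have hcast : ((n : Int) + 1) = ((n + 1 : Nat) : Int) := by push_cast; ring
        rw [hA, hcast, ih d (n+1) (by omega) hnk1, hmerge]
    · have hne : ¬ some d = some c := by simp [hd]
      have hA : goA thr (d :: rest) (n : Int) (some c)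
          = goA thr rest ((1 : Nat) : Int) (some d) := by
        simp [goA, hne]
      rw [hA, ih d 1 le_rfl (by
        have h2 : (2 : Int) ≤ (k : Int) := by rw [hk]; omega
        have : (2 : Nat) ≤ k := by exact_mod_cast h2
        omega)]
      rw [hasRun_prepend_short (fun h => hd h.symm) n hnk rest]
      rfl

-- hasRun as an any over all start positions.
theorem hasRun_eq_any_range (k : Nat) : ∀ (L : List Char),
    hasRun k L = (List.range L.length).any
      (fun j => decide ((L.drop j).take k
        = List.replicate k ((L.drop j).headD 'a'))) := by
  intro L
  induction L with
  | nil => rfl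
  | cons c rest ih =>
    simp only [hasRun, List.length_cons, List.range_succ_eq_map, List.any_cons,
      List.any_map]
    rw [ih]
    simp only [Function.comp_def, List.headD_eq_head?_getD, List.head?_drop,
      List.drop_succ_cons, List.getElem?_cons_succ, List.drop_zero, List.head?_cons, Option.getD_some]
    rfl

-- B's window scan equals hasRun, for 2 ≤ k.
theorem windows_eq_hasRun {k : Nat} (hk2 : 1 ≤ k) (L : List Char) :
    ((PySem.List.pyRange 0 ((L.length : Int) - (k : Int) + 1) 1).any fun i =>
      decide (PySem.List.slice L (some i) (some (i + (k : Int))) =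
        (match PySem.List.pyGet? L i with
         | some c => List.replicate k c
         | none => []))) = hasRun k L := by
  by_cases hlen : L.length + 1 ≤ k
  · -- no window fits: range empty, hasRun short
    rw [PySem.List.pyRange_one_eq_nil (by omega)]
    rw [hasRun_short L (by omega)]
    rfl
  · have hkle : k ≤ L.length := by omega
    -- the range is 0..(len-k+1), all indices are Nat casts
    have hM : ((L.length : Int) - (k : Int) + 1) = ((L.length - k + 1 : Nat) : Int) := by
      push_cast [Nat.cast_sub hkle]; ring
    rw [hM, PySem.List.pyRange_zero_natCast, List.any_map]
    rw [hasRun_eq_any_range k L]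
    have hsplit : List.range L.length
        = List.range (L.length - k + 1) ++ (List.range (k-1)).map ((L.length - k + 1) + ·) := by
      rw [← List.range_add]; congr 1; omega
    rw [hsplit, List.any_append, List.any_map]
    have htail : ((List.range (k-1)).any
        ((fun j => decide ((L.drop j).take k
          = List.replicate k ((L.drop j).headD 'a'))) ∘ ((L.length - k + 1) + ·))) = false := by
      rw [List.any_eq_false]
      intro j hj
      simp only [List.mem_range] at hj
      simp only [Function.comp_def, decide_eq_true_eq]
      intro he
      exact take_ne_replicate_of_short (k := k)
        (by rw [List.length_drop]; omega) he
    rw [htail, Bool.or_false]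
    have key : ∀ jn : Nat, jn < L.length →
        (decide (PySem.List.slice L (some ((jn : Nat) : Int))
            (some (((jn : Nat) : Int) + (k : Int))) =
          (match PySem.List.pyGet? L ((jn : Nat) : Int) with
           | some c => List.replicate k c
           | none => []))
         = decide ((L.drop jn).take k = List.replicate k ((L.drop jn).headD 'a'))) := by
      intro jn hjlen
      have hslice : PySem.List.slice L (some ((jn : Nat) : Int))
          (some (((jn : Nat) : Int) + (k : Int))) = (L.drop jn).take k :=
        PySem.List.slice_natCast_add L jn k
      have hget : PySem.List.pyGet? L ((jn : Nat) : Int) = L[jn]? := by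
        simp [pysem]
      have hgetsome : L[jn]? = some ((L.drop jn).headD 'a') := by
        rw [← List.head?_drop]
        rcases hhd : (L.drop jn).head? with _ | c
        · exfalso
          have := List.head?_eq_none_iff.mp hhd
          simp at this
          omega
        · simp [List.headD_eq_head?_getD, hhd]
      rw [hslice, hget, hgetsome]
    rw [Bool.eq_iff_iff]
    simp only [List.any_eq_true, List.mem_range, Function.comp_def]
    constructor
    · rintro ⟨jn, hj, hp⟩
      exact ⟨jn, hj, by rwa [key jn (by omega)] at hp⟩
    · rintro ⟨jn, hj, hp⟩
      exact ⟨jn, hj, by rwa [key jn (by omega)]⟩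

-- ===== VERDICT (by name: the statement is the Claim_ definition above) =====
theorem has_repetitive_chars_py_spec : Claim_equal_has_repetitive_chars_py := by
  intro text threshold _
  unfold Spec_has_repetitive_chars_py has_repetitive_chars_py has_repetitive_chars_py_alt
  set k : Nat := (max threshold 2).toNat with hkdef
  have hk : (k : Int) = max threshold 2 := by
    rw [hkdef]; exact Int.toNat_of_nonneg (by omega)
  have hk2 : 2 ≤ k := by
    have : (2 : Int) ≤ (k : Int) := by rw [hk]; omega
    exact_mod_cast this
  simp only []
  rw [← hk, Int.toNat_natCast, windows_eq_hasRun (by omega)]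
  cases htl : text.toList with
  | nil => simp [goA, hasRun]
  | cons c rest =>
    have h0 : goA threshold (c :: rest) 0 none
        = goA threshold rest ((1 : Nat) : Int) (some c) := by
      simp [goA]
    rw [h0, goA_eq_hasRun hk rest c 1 le_rfl (by omega)]
    rfl
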